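-- pv_equiv track=rewrite | github.com/QuantSysBio/inSPIRE | inspire/utils.py | permute_seq
-- ===== SOURCE A (Python) =====
-- def permute_seq(peptide, uniform_length=False):
--     """ Function to generate all possible permutations on a peptide
--         sequence due to adjacent amino acid swaps.
--
--     Parameters
--     ----------
--     peptide : str
--         The original peptide.
--     uniform_length : bool (default=False)
--         Flag indicating whether to return a list of length 29 (max possible permutations)
--         or to only return the permutations possible.
--
--     Returns
--     -------
--     permed_peps : list of str or None
--         A list of the possible peptide permutations.
--     """
--     permed_peps = []
--     for idx in range(len(peptide)-1):
--         if peptide[idx] != peptide[idx+1]: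
--             permed_peps.append(
--                 peptide[:idx] + peptide[idx+1] + peptide[idx] + peptide[idx+2:]
--             )
--         elif uniform_length:
--             permed_peps.append(None)
--     if uniform_length:
--         permed_peps += [None]*(29-len(permed_peps))
--     return permed_peps
-- ===== SOURCE B (Python) =====
-- def permute_seq(peptide, uniform_length=False):
--     """Zipper walk: slide a (prefix, rest) pair over the sequence with no index
--     arithmetic; each step emits the swap of rest's first two characters (or None),
--     and the uniform-vs-filtered output shape is decided once at the end."""
--     cands = []
--     prefix, rest = '', peptide
--     while len(rest) >= 2:
--         cands.append(prefix + rest[1] + rest[0] + rest[2:]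
--                      if rest[0] != rest[1] else None)
--         prefix, rest = prefix + rest[0], rest[1:]
--     if uniform_length:
--         return cands + [None] * (29 - len(cands))
--     return [c for c in cands if c is not None]
-- ===== Notes on version B (the rewrite author's own statement) =====
-- stated objective: alternative
-- what changed: B replaces A's indexed loop (range over positions, slicing the fixed string at idx, branching on uniform_length at every step) by a zipper walk that slides a (prefix, rest) pair over the sequence with no index arithmetic, emits one uniform candidate (swap or None) per step, and decides the uniform-length/filtered output shape once at the end.
import Mathlib
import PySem

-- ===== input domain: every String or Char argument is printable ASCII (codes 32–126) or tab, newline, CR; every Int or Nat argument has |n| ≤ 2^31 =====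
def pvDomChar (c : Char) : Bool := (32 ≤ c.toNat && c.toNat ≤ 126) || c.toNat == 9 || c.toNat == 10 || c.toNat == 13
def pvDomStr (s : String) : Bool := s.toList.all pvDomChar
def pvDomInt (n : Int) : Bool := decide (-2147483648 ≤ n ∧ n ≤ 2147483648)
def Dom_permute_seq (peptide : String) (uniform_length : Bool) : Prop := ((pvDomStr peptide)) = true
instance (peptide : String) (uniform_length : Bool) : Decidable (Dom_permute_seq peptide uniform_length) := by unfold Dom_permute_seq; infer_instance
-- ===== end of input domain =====

-- B: a (prefix, rest) zipper walk with end shaping instead of A's indexed loop; objective: alternative decomposition (not faster).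

-- ===== PORT A =====
-- peptide[:idx] + peptide[idx+1] + peptide[idx] + peptide[idx+2:] (indices always in range inside the loop)
def pvSwapAt (cs : List Char) (idx : Int) : String :=
  String.ofList (PySem.List.slice cs none (some idx) ++
    [PySem.List.pyGetD cs (idx + 1) ' ', PySem.List.pyGetD cs idx ' '] ++
    PySem.List.slice cs (some (idx + 2)) none)

def permute_seq (peptide : String) (uniform_length : Bool) : List (Option String) :=
  let cs := peptide.toList
  let permed :=
    (PySem.List.pyRange 0 (PySem.Str.len peptide - 1) 1).foldl
      (fun acc idx =>
        if PySem.List.pyGetD cs idx ' ' ≠ PySem.List.pyGetD cs (idx + 1) ' ' then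
          acc ++ [some (pvSwapAt cs idx)]
        else if uniform_length then
          acc ++ [none]
        else acc)
      []
  if uniform_length then
    permed ++ List.replicate (29 - (permed.length : Int)).toNat (none : Option String)
  else permed

-- ===== PORT B =====
-- B's while-loop: slide a (prefix, rest) zipper over the characters.
def pvWalk (pre : List Char) : List Char → List (Option String)
  | a :: b :: rest =>
      (if a ≠ b then some (String.ofList (pre ++ b :: a :: rest)) else none) ::
      pvWalk (pre ++ [a]) (b :: rest)
  | _ => []

def permute_seq_alt (peptide : String) (uniform_length : Bool) : List (Option String) :=
  let cands := pvWalk [] peptide.toList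
  if uniform_length then
    cands ++ List.replicate (29 - (cands.length : Int)).toNat (none : Option String)
  else cands.filter (fun c => c ≠ none)

-- ===== PRECONDITION & SPEC =====
def Spec_permute_seq (peptide : String) (uniform_length : Bool) (out : List (Option String)) : Prop := out = permute_seq_alt peptide uniform_length
instance (peptide : String) (uniform_length : Bool) (out : List (Option String)) : Decidable (Spec_permute_seq peptide uniform_length out) := by unfold Spec_permute_seq; infer_instance

-- ===== CLAIM =====
def Claim_equal_permute_seq : Prop := ∀ (peptide : String) (uniform_length : Bool), Dom_permute_seq peptide uniform_length → Spec_permute_seq peptide uniform_length (permute_seq peptide uniform_length)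

-- ===== LEMMAS AND PROOFS =====

-- A's loop, over any index list, is the candidate map (uniform) resp. its non-None filter.
theorem foldl_eq_map_or_filter {α : Type} (p : α → Bool) (f : α → String) (u : Bool)
    (l : List α) (acc : List (Option String)) :
    l.foldl
      (fun acc i => if p i then acc ++ [some (f i)] else if u then acc ++ [none] else acc)
      acc
    = acc ++ (if u then l.map (fun i => if p i then some (f i) else none)
              else (l.map (fun i => if p i then some (f i) else none)).filter
                     (fun c => c ≠ none)) := by
  cases u with
  | false =>
    simp only [Bool.false_eq_true, if_false]
    induction l generalizing acc with
    | nil => simp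
    | cons x xs ih =>
      simp only [List.foldl_cons, List.map_cons]
      by_cases hp : p x = true
      · rw [if_pos hp, ih]
        simp [hp]
      · simp only [Bool.not_eq_true] at hp
        rw [if_neg (by simp [hp]), ih]
        simp [hp]
  | true =>
    simp only [if_true]
    induction l generalizing acc with
    | nil => simp
    | cons x xs ih =>
      simp only [List.foldl_cons, List.map_cons]
      by_cases hp : p x = true
      · rw [if_pos hp, ih]
        simp [hp]
      · simp only [Bool.not_eq_true] at hp
        rw [if_neg (by simp [hp]), ih]
        simp [hp]

-- B's zipper walk computes exactly the indexed candidate map of A.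
theorem pvWalk_eq_map (pre cs : List Char) :
    pvWalk pre cs = (List.range (cs.length - 1)).map
      (fun k => if cs.getD k ' ' ≠ cs.getD (k + 1) ' '
                then some (String.ofList (pre ++ cs.take k ++
                  [cs.getD (k + 1) ' ', cs.getD k ' '] ++ cs.drop (k + 2)))
                else none) := by
  match cs with
  | [] => simp [pvWalk]
  | [a] => simp [pvWalk]
  | a :: b :: rest =>
    rw [pvWalk, pvWalk_eq_map (pre ++ [a]) (b :: rest)]
    simp only [List.length_cons, Nat.add_sub_cancel, List.range_succ_eq_map,
      List.map_cons, List.map_map]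
    refine List.cons_eq_cons.mpr ⟨by simp, ?_⟩
    apply List.map_congr_left
    intro k _
    simp only [Function.comp_apply, List.getD_cons_succ, List.take_succ_cons,
      List.drop_succ_cons]
    split_ifs with h
    · simp
    · rfl

theorem permute_seq_eq_alt (peptide : String) (uniform_length : Bool) :
    permute_seq peptide uniform_length = permute_seq_alt peptide uniform_length := by
  unfold permute_seq permute_seq_alt
  have h := foldl_eq_map_or_filter
    (fun i => decide (PySem.List.pyGetD peptide.toList i ' ' ≠ PySem.List.pyGetD peptide.toList (i + 1) ' '))
    (fun i => pvSwapAt peptide.toList i) uniform_length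
    (PySem.List.pyRange 0 (PySem.Str.len peptide - 1) 1) []
  simp only [decide_eq_true_eq, List.nil_append] at h
  simp only [ne_eq, h]
  have hmap : (PySem.List.pyRange 0 (PySem.Str.len peptide - 1) 1).map
      (fun i => if PySem.List.pyGetD peptide.toList i ' ' ≠ PySem.List.pyGetD peptide.toList (i + 1) ' '
                then some (pvSwapAt peptide.toList i) else none)
      = pvWalk [] peptide.toList := by
    rw [pvWalk_eq_map, PySem.List.pyRange_one]
    have hlen : (PySem.Str.len peptide - 1 - 0).toNat = peptide.toList.length - 1 := by
      rw [PySem.Str.len_eq]; omega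
    rw [hlen, List.map_map]
    apply List.map_congr_left
    intro k _
    simp only [Function.comp_apply, zero_add, pvSwapAt]
    have h1 : ((k : Int) + 1) = ((k + 1 : Nat) : Int) := by push_cast; ring
    have h2 : ((k : Int) + 2) = ((k + 2 : Nat) : Int) := by push_cast; ring
    rw [h1, h2, PySem.List.slice_to_natCast, PySem.List.slice_from_natCast,
      PySem.List.pyGetD_natCast, PySem.List.pyGetD_natCast]
    simp
  rw [hmap]
  cases uniform_length <;> simp

-- ===== VERDICT =====
theorem permute_seq_spec : Claim_equal_permute_seq := by
  intro peptide uniform_length _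
  exact permute_seq_eq_alt peptide uniform_length
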